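-- pv_equiv track=rewrite | github.com/carloseduneto/00_Faculdade | 03_The_Subtle_Line/Dados 2/99_Ativdidades/01_Recursividade/17_Elementos_Crescente.py | maiorSubcrescente
-- ===== SOURCE A (Python) =====
-- def maiorSubcrescente(lista):
--     subcrescente = []
--     for elemento in lista:
--         if not subcrescente or elemento >= subcrescente[-1]:
--             subcrescente.append(elemento)
--         else:
--             subcrescente = [elemento]
--     return subcrescente
-- ===== SOURCE B (Python) =====
-- def maiorSubcrescente(lista):
--     if not lista:
--         return []
--     i = len(lista) - 1
--     while i > 0 and lista[i - 1] <= lista[i]: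
--         i -= 1
--     return lista[i:]
-- ===== Notes on version B (the rewrite author's own statement) =====
-- stated objective: alternative
-- what changed: Instead of folding forward and rebuilding/restarting an accumulator list at every descent, B scans backward from the end to find the start index of the final non-decreasing run and returns a single slice, building no intermediate lists.
import Mathlib
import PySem

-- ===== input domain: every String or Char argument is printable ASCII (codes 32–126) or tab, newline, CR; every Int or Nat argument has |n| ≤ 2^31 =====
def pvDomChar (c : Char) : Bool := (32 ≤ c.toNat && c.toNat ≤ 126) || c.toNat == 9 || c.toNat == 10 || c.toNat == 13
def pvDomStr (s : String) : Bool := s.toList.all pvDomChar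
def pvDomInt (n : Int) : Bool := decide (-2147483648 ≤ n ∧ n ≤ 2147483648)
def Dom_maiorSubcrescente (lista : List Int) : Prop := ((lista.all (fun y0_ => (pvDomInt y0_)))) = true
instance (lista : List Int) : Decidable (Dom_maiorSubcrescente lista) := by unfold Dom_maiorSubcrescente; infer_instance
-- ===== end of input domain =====

-- B replaces A's forward fold (which restarts an accumulator at each descent) by a backward
-- scan for the start index of the final non-decreasing run followed by one slice (alternative).

-- ===== PORT A =====
def maiorSubcrescente (lista : List Int) : List Int :=
  lista.foldl (fun subcrescente elemento =>
    if subcrescente = [] ∨ (PySem.List.pyGet? subcrescente (-1)).getD 0 ≤ elemento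
    then subcrescente ++ [elemento]
    else [elemento]) []

-- ===== PORT B =====
-- the while loop 'while i > 0 and lista[i-1] <= lista[i]: i -= 1', run from i = len-1
def altLoop (lista : List Int) : Nat → Nat
  | 0 => 0
  | j + 1 => if lista.getD j 0 ≤ lista.getD (j + 1) 0 then altLoop lista j else j + 1

def maiorSubcrescente_alt (lista : List Int) : List Int :=
  if lista = [] then []
  else lista.drop (altLoop lista (lista.length - 1))

-- ===== PRECONDITION & SPEC =====
def Spec_maiorSubcrescente (lista : List Int) (out : List Int) : Prop := out = maiorSubcrescente_alt lista
instance (lista : List Int) (out : List Int) : Decidable (Spec_maiorSubcrescente lista out) := by unfold Spec_maiorSubcrescente; infer_instance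

-- ===== CLAIM (what is proved, stated in full; the proofs are below) =====
def Claim_equal_maiorSubcrescente : Prop := ∀ (lista : List Int), Dom_maiorSubcrescente lista → Spec_maiorSubcrescente lista (maiorSubcrescente lista)

-- ===== LEMMAS AND PROOFS =====

theorem maiorA_concat (l : List Int) (x : Int) :
    maiorSubcrescente (l ++ [x]) =
      (if maiorSubcrescente l = [] ∨ (PySem.List.pyGet? (maiorSubcrescente l) (-1)).getD 0 ≤ x
       then maiorSubcrescente l ++ [x] else [x]) := by
  simp [maiorSubcrescente, List.foldl_append]

theorem maiorA_getLast? (l : List Int) (x : Int) :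
    (maiorSubcrescente (l ++ [x])).getLast? = some x := by
  rw [maiorA_concat]
  split_ifs <;> simp [List.getLast?_concat]

theorem maiorA_ne_nil (l : List Int) (h : l ≠ []) : maiorSubcrescente l ≠ [] := by
  induction l using List.reverseRecOn with
  | nil => exact absurd rfl h
  | append_singleton l x _ =>
    intro hnil
    have := maiorA_getLast? l x
    rw [hnil] at this
    simp at this

theorem altLoop_append (l : List Int) (x : Int) :
    ∀ i, i < l.length → altLoop (l ++ [x]) i = altLoop l i := by
  intro i
  induction i with
  | zero => intro _; rfl
  | succ j ih =>
    intro hj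
    have hj' : j < l.length := Nat.lt_of_succ_lt hj
    simp only [altLoop, List.getD_append _ _ _ _ hj', List.getD_append _ _ _ _ hj]
    split
    · exact ih hj'
    · rfl

theorem altLoop_le (l : List Int) : ∀ i, altLoop l i ≤ i := by
  intro i
  induction i with
  | zero => exact Nat.le_refl 0
  | succ j ih =>
    simp only [altLoop]
    split
    · exact Nat.le_succ_of_le ih
    · exact Nat.le_refl _

theorem maiorAlt_concat (l : List Int) (x : Int) (h : l ≠ []) :
    maiorSubcrescente_alt (l ++ [x]) =
      (if l.getLast?.getD 0 ≤ x then maiorSubcrescente_alt l ++ [x] else [x]) := by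
  obtain ⟨m, hm⟩ : ∃ m, l.length = m + 1 :=
    ⟨l.length - 1, (Nat.succ_pred_eq_of_pos (List.length_pos_iff.mpr h)).symm⟩
  have hne : l ++ [x] ≠ [] := by simp
  have hlen : (l ++ [x]).length - 1 = m + 1 := by simp [hm]
  have hgx : (l ++ [x]).getD (m + 1) 0 = x := by
    rw [← hm]
    simp [List.getD_eq_getElem?_getD]
  have hgm : (l ++ [x]).getD m 0 = l.getD m 0 := List.getD_append _ _ _ _ (by omega)
  have hlast : l.getLast?.getD 0 = l.getD m 0 := by
    rw [List.getLast?_eq_getElem?, List.getD_eq_getElem?_getD, hm]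
    simp
  simp only [maiorSubcrescente_alt, if_neg hne, if_neg h, hlen, hm, altLoop, hgx, hgm, ← hlast]
  split
  · rw [altLoop_append l x m (by omega),
      List.drop_append_of_le_length (Nat.le_trans (altLoop_le l m) (by omega)), Nat.add_sub_cancel]
  · rw [show m + 1 = l.length from hm.symm]
    simp

theorem maiorA_last_eq (l : List Int) (h : l ≠ []) :
    (maiorSubcrescente l).getLast? = l.getLast? := by
  induction l using List.reverseRecOn with
  | nil => exact absurd rfl h
  | append_singleton l x _ =>
    rw [maiorA_getLast?, List.getLast?_concat]

theorem maior_eq_alt (l : List Int) : maiorSubcrescente l = maiorSubcrescente_alt l := by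
  induction l using List.reverseRecOn with
  | nil => rfl
  | append_singleton l x ih =>
    by_cases hl : l = []
    · subst hl
      simp [maiorSubcrescente, maiorSubcrescente_alt, altLoop]
    · have hA := maiorA_ne_nil l hl
      rw [maiorA_concat, maiorAlt_concat l x hl, ← ih]
      rw [PySem.List.pyGet?_neg_one, maiorA_last_eq l hl]
      simp only [hA, false_or]

-- ===== VERDICT (by name: the statement is the Claim_ definition above) =====
theorem maiorSubcrescente_spec : Claim_equal_maiorSubcrescente := by
  intro lista _
  exact maior_eq_alt lista
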